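-- pv_equiv track=rewrite | github.com/joostone-ahn/sim-reader | ursp/display.py | hex_format
-- ===== SOURCE A (Python) =====
-- def hex_format(hex_stream, bytes_per_line=16):
--     """Format hex string with line numbers"""
--     try:
--         # Remove spaces and ensure uppercase
--         hex_clean = hex_stream.replace(' ', '').upper()
--
--         # Split into bytes
--         hex_list = [hex_clean[i:i+2] for i in range(0, len(hex_clean), 2)]
--
--         result = []
--         for i in range(0, len(hex_list), bytes_per_line):
--             hex_line = hex_list[i:i + bytes_per_line]
--             hex_str = ' '.join(hex_line)
--             # Format with proper line number and spacing
--             result.append(f"{i:04X}   {hex_str}")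
--
--         return '\n'.join(result)
--
--     except Exception as e:
--         return f"Error formatting hex: {str(e)}"
-- ===== SOURCE B (Python) =====
-- def hex_format(hex_stream, bytes_per_line=16):
--     """Format hex string with line numbers"""
--     try:
--         clean = hex_stream.replace(' ', '').upper()
--         step = 2 * bytes_per_line
--         lines = []
--         for i in range(0, len(clean), step):
--             chunk = clean[i:i + step]
--             hex_str = ' '.join(chunk[j:j + 2] for j in range(0, len(chunk), 2))
--             lines.append(f"{i // 2:04X}   {hex_str}")
--         return '\n'.join(lines)
--     except Exception as e:
--         return f"Error formatting hex: {str(e)}"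
-- ===== Notes on version B (the rewrite author's own statement) =====
-- stated objective: alternative
-- what changed: B drops A's intermediate list of all 2-char byte tokens: it walks the cleaned string directly in chunks of 2*bytes_per_line characters, tokenising each chunk on the fly and numbering lines by character offset // 2.
import Mathlib
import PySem

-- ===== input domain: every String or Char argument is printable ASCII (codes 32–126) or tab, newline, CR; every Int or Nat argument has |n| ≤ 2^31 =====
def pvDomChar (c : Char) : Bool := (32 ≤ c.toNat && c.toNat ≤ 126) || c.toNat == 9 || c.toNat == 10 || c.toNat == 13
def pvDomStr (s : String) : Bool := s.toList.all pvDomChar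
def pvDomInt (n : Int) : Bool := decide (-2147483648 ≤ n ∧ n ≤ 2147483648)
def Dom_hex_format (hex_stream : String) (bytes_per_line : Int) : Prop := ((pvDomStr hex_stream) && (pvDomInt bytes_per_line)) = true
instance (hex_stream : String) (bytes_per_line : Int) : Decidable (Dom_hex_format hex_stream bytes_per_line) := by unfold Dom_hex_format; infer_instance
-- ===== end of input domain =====

-- B replaces A's two-phase "build the full byte-token list, then slice it per line" by a single
-- chunked scan over the cleaned string (2*bytes_per_line characters per line); same return value.

-- f"{i:04X}" for the non-negative line offsets both programs produce (exact for 0 <= i)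
def pvHexDigit (n : Nat) : Char := if n < 10 then Char.ofNat (48 + n) else Char.ofNat (55 + n)

def pvHexChars : Nat → List Char
  | 0 => []
  | n + 1 => pvHexChars ((n + 1) / 16) ++ [pvHexDigit ((n + 1) % 16)]
decreasing_by exact Nat.div_lt_self (Nat.succ_pos n) (by omega)

def pvFmt04X (i : Int) : List Char :=
  let ds := if i.toNat = 0 then ['0'] else pvHexChars i.toNat
  List.replicate (4 - ds.length) '0' ++ ds

-- ===== PORT A =====
def hex_format (hex_stream : String) (bytes_per_line : Int) : String :=
  let hex_clean := PySem.Chars.upper (PySem.Chars.replace hex_stream.toList [' '] [])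
  let hex_list := (PySem.List.pyRange 0 (hex_clean.length : Int) 2).map
      (fun i => PySem.List.slice hex_clean (some i) (some (i + 2)))
  if bytes_per_line = 0 then
    -- except branch: range(0, len(hex_list), 0) raises ValueError
    "Error formatting hex: range() arg 3 must not be zero"
  else
    let result := (PySem.List.pyRange 0 (hex_list.length : Int) bytes_per_line).map
      (fun i => pvFmt04X i ++ "   ".toList ++
        PySem.Chars.join [' '] (PySem.List.slice hex_list (some i) (some (i + bytes_per_line))))
    String.ofList (PySem.Chars.join ['\n'] result)

-- ===== PORT B =====
def hex_format_alt (hex_stream : String) (bytes_per_line : Int) : String :=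
  let clean := PySem.Chars.upper (PySem.Chars.replace hex_stream.toList [' '] [])
  let step := 2 * bytes_per_line
  if step = 0 then
    -- except branch: range(0, len(clean), 0) raises ValueError
    "Error formatting hex: range() arg 3 must not be zero"
  else
    let lines := (PySem.List.pyRange 0 (clean.length : Int) step).map (fun i =>
      let chunk := PySem.List.slice clean (some i) (some (i + step))
      let hex_str := PySem.Chars.join [' ']
        ((PySem.List.pyRange 0 (chunk.length : Int) 2).map
          (fun j => PySem.List.slice chunk (some j) (some (j + 2))))
      pvFmt04X (PySem.Int.floordiv i 2) ++ "   ".toList ++ hex_str)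
    String.ofList (PySem.Chars.join ['\n'] lines)

-- ===== PRECONDITION & SPEC =====
def Spec_hex_format (hex_stream : String) (bytes_per_line : Int) (out : String) : Prop := out = hex_format_alt hex_stream bytes_per_line
instance (hex_stream : String) (bytes_per_line : Int) (out : String) : Decidable (Spec_hex_format hex_stream bytes_per_line out) := by unfold Spec_hex_format; infer_instance

-- ===== CLAIM (what is proved, stated in full; the proofs are below) =====
def Claim_equal_hex_format : Prop := ∀ (hex_stream : String) (bytes_per_line : Int), Dom_hex_format hex_stream bytes_per_line → Spec_hex_format hex_stream bytes_per_line (hex_format hex_stream bytes_per_line)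

-- ===== LEMMAS AND PROOFS =====

-- range(0, n, s) is empty for a negative step and a non-negative stop
theorem pv_pyRange_neg_step (n : Nat) (s : Int) (hs : s < 0) :
    PySem.List.pyRange 0 (n : Int) s = [] := by
  simp only [PySem.List.pyRange, if_neg (by omega : ¬ s = 0), if_neg (by omega : ¬ 0 < s),
    if_neg (by omega : ¬ (n : Int) < 0), List.range_zero, List.map_nil]

def toks (L : List Char) : List (List Char) :=
  (List.range ((L.length + 1) / 2)).map (fun j => (L.drop (2 * j)).take 2)

theorem pv_toNat_count (x b : Nat) (hb : 0 < b) (hx : 0 < x) :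
    (((x : Int) - 0 + b - 1) / (b : Int)).toNat = (x - 1) / b + 1 := by
  have h1 : ((x : Int) - 0 + b - 1) = (((x - 1) + b : Nat) : Int) := by push_cast; omega
  rw [h1, ← Int.natCast_div, Int.toNat_natCast, Nat.add_div_right _ hb]

theorem pv_hexList (L : List Char) :
    (PySem.List.pyRange 0 (L.length : Int) 2).map
      (fun i => PySem.List.slice L (some i) (some (i + 2))) = toks L := by
  rw [PySem.List.pyRange_of_pos 0 _ (by norm_num), List.map_map, toks]
  have hc : (if (0:Int) < (L.length : Int) then (((L.length : Int) - 0 + 2 - 1) / 2).toNat else 0)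
      = (L.length + 1) / 2 := by
    split_ifs with h
    · omega
    · omega
  rw [hc]
  apply List.map_congr_left
  intro j hj
  simp only [Function.comp_apply]
  rw [PySem.List.slice_toNat L (by positivity) (by positivity)]
  have e1 : ((0:Int) + 2 * (j:Int)).toNat = 2 * j := by omega
  have e2 : ((0:Int) + 2 * (j:Int) + 2).toNat = 2 * j + 2 := by omega
  rw [e1, e2, Nat.add_sub_cancel_left]

theorem pv_take_range' (b t q : Nat) : (List.range' q t).take b = List.range' q (min b t) := by
  induction t generalizing q b with
  | zero => simp
  | succ t ih =>
    cases b with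
    | zero => simp
    | succ b => simp [List.range'_succ, ih, Nat.succ_min_succ]

theorem pv_line (L : List Char) (b q : Nat) (hk : 2 * q + 1 ≤ L.length) :
    ((toks L).drop q).take b = toks ((L.drop (2 * q)).take (2 * b)) := by
  have hlen : ((L.drop (2*q)).take (2*b)).length = min (2*b) (L.length - 2*q) := by
    simp [List.length_take, List.length_drop]
  simp only [toks]
  rw [← List.map_drop, ← List.map_take]
  simp only [List.range_eq_range', List.drop_range', mul_one, zero_add]
  rw [pv_take_range', List.range'_eq_map_range, List.map_map, hlen]
  have ht : min b ((L.length + 1) / 2 - q) = (min (2*b) (L.length - 2*q) + 1) / 2 := by omega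
  rw [ht, ← List.range_eq_range']
  apply List.map_congr_left
  intro j hj
  rw [List.mem_range] at hj
  simp only [Function.comp_apply]
  rw [List.drop_take, List.drop_drop, List.take_take]
  have h2 : min 2 (2 * b - 2 * j) = 2 := by omega
  rw [h2]
  congr 2
  omega


theorem pv_main (L : List Char) (b : Nat) (hb : 0 < b) :
    ((PySem.List.pyRange 0 (((PySem.List.pyRange 0 (L.length : Int) 2).map
        (fun i => PySem.List.slice L (some i) (some (i + 2)))).length : Int) (b : Int)).map
      (fun i => pvFmt04X i ++ "   ".toList ++
        PySem.Chars.join [' '] (PySem.List.slice ((PySem.List.pyRange 0 (L.length : Int) 2).map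
          (fun i => PySem.List.slice L (some i) (some (i + 2)))) (some i) (some (i + (b : Int))))))
    = ((PySem.List.pyRange 0 (L.length : Int) (2 * (b : Int))).map (fun i =>
        pvFmt04X (PySem.Int.floordiv i 2) ++ "   ".toList ++
        PySem.Chars.join [' ']
        ((PySem.List.pyRange 0 ((PySem.List.slice L (some i) (some (i + 2 * (b : Int)))).length : Int) 2).map
          (fun j => PySem.List.slice (PySem.List.slice L (some i) (some (i + 2 * (b : Int)))) (some j) (some (j + 2)))))) := by
  rw [pv_hexList]
  have hm : (toks L).length = (L.length + 1) / 2 := by simp [toks]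
  rw [hm]
  rw [PySem.List.pyRange_of_pos 0 _ (by exact_mod_cast hb : (0:Int) < (b:Int)),
      PySem.List.pyRange_of_pos 0 _ (by positivity : (0:Int) < 2*(b:Int))]
  set n := L.length with hn
  have hK : (if (0:Int) < (((n+1)/2 : Nat) : Int)
        then (((((n+1)/2 : Nat) : Int) - 0 + (b:Int) - 1) / (b:Int)).toNat else 0)
      = (if (0:Int) < (n : Int)
        then (((n : Int) - 0 + 2*(b:Int) - 1) / (2*(b:Int))).toNat else 0) := by
    by_cases h0 : n = 0
    · simp [h0]
    · rw [if_pos (by omega : (0:Int) < (((n+1)/2 : Nat) : Int)), if_pos (by omega : (0:Int) < (n:Int))]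
      have e3 : (2*(b:Int)) = ((2*b : Nat) : Int) := by push_cast; ring
      rw [e3, pv_toNat_count _ _ hb (by omega), pv_toNat_count _ _ (by omega) (by omega)]
      have : (n+1)/2 - 1 = (n-1)/2 := by omega
      rw [this, Nat.div_div_eq_div_mul]
  rw [hK]
  simp only [List.map_map]
  apply List.map_congr_left
  intro k hk
  rw [List.mem_range] at hk
  simp only [Function.comp_apply]
  have hkn : 2 * (b * k) + 1 ≤ n := by
    by_cases h0 : n = 0
    · rw [if_neg (by omega : ¬ (0:Int) < (n:Int))] at hk
      omega
    · rw [if_pos (by omega : (0:Int) < (n:Int))] at hk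
      have e3 : (2*(b:Int)) = ((2*b : Nat) : Int) := by push_cast; ring
      rw [e3, pv_toNat_count _ _ (by omega) (by omega)] at hk
      have h2 : k ≤ (n-1)/(2*b) := by omega
      have h3 := (Nat.le_div_iff_mul_le (by omega : 0 < 2*b)).mp h2
      have h4 : k * (2*b) = 2 * (b * k) := by ring
      omega
  have e1 : ((0:Int) + (b:Int) * (k:Int)) = ((b*k : Nat) : Int) := by push_cast; ring
  have e2 : ((0:Int) + 2 * (b:Int) * (k:Int)) = ((2*(b*k) : Nat) : Int) := by push_cast; ring
  have e3 : (2*(b:Int)) = ((2*b : Nat) : Int) := by push_cast; ring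
  rw [e1, e2, e3, PySem.List.slice_natCast_add, PySem.List.slice_natCast_add, pv_hexList]
  rw [PySem.Int.floordiv_eq_ediv_of_pos (by norm_num)]
  have e4 : (((2*(b*k) : Nat) : Int)) / 2 = ((b*k : Nat) : Int) := by omega
  rw [e4, pv_line L b (b*k) hkn]

-- ===== VERDICT (by name: the statement is the Claim_ definition above) =====
theorem hex_format_spec : Claim_equal_hex_format := by
  intro s bpl _
  unfold Spec_hex_format hex_format hex_format_alt
  rcases lt_trichotomy bpl 0 with hneg | h0 | hpos
  · simp only [if_neg (by omega : ¬ bpl = 0), if_neg (by omega : ¬ 2 * bpl = 0)]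
    rw [pv_pyRange_neg_step _ bpl hneg, pv_pyRange_neg_step _ (2 * bpl) (by omega)]
    simp
  · simp [h0]
  · simp only [if_neg (by omega : ¬ bpl = 0), if_neg (by omega : ¬ 2 * bpl = 0)]
    have hb : bpl = ((bpl.toNat : Nat) : Int) := by omega
    rw [hb]
    rw [pv_main _ bpl.toNat (by omega)]
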